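-- pv_equiv track=rewrite | github.com/PolyDataLab/CourseEnrollmentPred | Predict_from_Recommendation/CDREAM/test_CIS.py | calculate_term_dict_false
-- ===== SOURCE A (Python) =====
-- def calculate_term_dict_false(term_dict_false, semester, t_basket, pred_basket, reversed_item_dict):
--     for item in pred_basket:
--         if item not in t_basket:
--             if semester not in term_dict_false:
--                 count_course = {}
--             else:
--                 count_course = term_dict_false[semester]
--             if item not in count_course:
--                 count_course[item] = 1
--             else:
--                 count_course[item] = count_course[item]+ 1
--             term_dict_false[semester] = count_course
--     return term_dict_false
-- ===== SOURCE B (Python) =====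
-- def calculate_term_dict_false(term_dict_false, semester, t_basket, pred_basket, reversed_item_dict):
--     absent = [item for item in pred_basket if item not in t_basket]
--     if absent:
--         tally = {item: absent.count(item) for item in dict.fromkeys(absent)}
--         count_course = term_dict_false.get(semester, {})
--         for item, c in tally.items():
--             count_course[item] = count_course.get(item, 0) + c
--         term_dict_false[semester] = count_course
--     return term_dict_false
-- ===== Notes on version B (the rewrite author's own statement) =====
-- stated objective: alternative
-- what changed: A interleaves per-item membership test, dict fetch, counter update and write-back inside one loop over pred_basket; B first filters the absent items, tallies them into a dict keyed by first appearance (dedup + count), then merges that tally into the semester's counter once and writes it back with a single assignment, guarded so an empty tally never creates the semester key.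
import Mathlib
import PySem

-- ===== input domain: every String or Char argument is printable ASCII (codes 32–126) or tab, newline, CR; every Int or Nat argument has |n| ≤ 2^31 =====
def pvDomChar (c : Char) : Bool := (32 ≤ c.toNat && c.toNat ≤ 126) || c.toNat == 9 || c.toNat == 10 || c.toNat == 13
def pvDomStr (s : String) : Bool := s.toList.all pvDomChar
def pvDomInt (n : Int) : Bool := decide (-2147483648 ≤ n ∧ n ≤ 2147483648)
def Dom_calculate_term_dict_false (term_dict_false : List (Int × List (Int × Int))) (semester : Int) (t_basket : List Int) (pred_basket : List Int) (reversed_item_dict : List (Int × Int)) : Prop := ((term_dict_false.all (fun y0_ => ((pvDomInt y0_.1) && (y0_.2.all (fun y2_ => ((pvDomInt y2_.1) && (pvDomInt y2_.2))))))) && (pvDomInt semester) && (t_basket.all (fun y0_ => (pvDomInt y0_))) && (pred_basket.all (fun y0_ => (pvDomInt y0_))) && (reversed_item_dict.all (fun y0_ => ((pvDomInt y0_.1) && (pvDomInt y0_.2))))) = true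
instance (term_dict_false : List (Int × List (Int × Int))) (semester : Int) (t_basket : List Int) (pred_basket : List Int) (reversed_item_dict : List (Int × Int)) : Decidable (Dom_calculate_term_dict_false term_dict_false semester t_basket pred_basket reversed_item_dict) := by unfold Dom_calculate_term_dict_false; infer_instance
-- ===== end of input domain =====

-- B replaces A's interleaved per-item membership test / dict fetch / write-back with: filter the absent
-- items once, tally them by dedup+count, then merge the tally into the semester's counter in one pass
-- with a single write-back (objective: alternative decomposition, same cost class).
-- Both Pythons mutate term_dict_false (and its inner dict) in place in the same way; the equivalence
-- proved here is about the returned value.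

-- shared boilerplate: a dict[int, dict[int, int]] argument as a nested PySem.Dict, and back
def pvMkTD (td : List (Int × List (Int × Int))) : PySem.Dict Int (PySem.Dict Int Int) :=
  PySem.Dict.mk (td.map (fun p => (p.1, PySem.Dict.mk p.2)))
def pvOutTD (d : PySem.Dict Int (PySem.Dict Int Int)) : List (Int × List (Int × Int)) :=
  d.items.map (fun p => (p.1, p.2.items))

-- ===== PORT A =====
def calculate_term_dict_false (term_dict_false : List (Int × List (Int × Int))) (semester : Int) (t_basket : List Int) (pred_basket : List Int) (reversed_item_dict : List (Int × Int)) : List (Int × List (Int × Int)) :=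
  pvOutTD (pred_basket.foldl (fun d item =>
    if (t_basket.contains item) = false then
      -- if semester not in term_dict_false: {} / else: term_dict_false[semester]
      let count_course := if (d.contains semester) = false then PySem.Dict.empty else d.getD semester PySem.Dict.empty
      -- count_course[item] = 1 / count_course[item] + 1
      let count_course := if (count_course.contains item) = false then count_course.insert item 1 else count_course.insert item (count_course.getD item 0 + 1)
      d.insert semester count_course
    else d) (pvMkTD term_dict_false))

-- ===== PORT B =====
def calculate_term_dict_false_alt (term_dict_false : List (Int × List (Int × Int))) (semester : Int) (t_basket : List Int) (pred_basket : List Int) (reversed_item_dict : List (Int × Int)) : List (Int × List (Int × Int)) :=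
  let absent := pred_basket.filter (fun item => !(t_basket.contains item))
  if absent.isEmpty then term_dict_false
  else
    -- tally = {item: absent.count(item) for item in dict.fromkeys(absent)}
    let tally := (PySem.List.dedup absent).map (fun item => (item, (absent.count item : Int)))
    let d := pvMkTD term_dict_false
    -- count_course = term_dict_false.get(semester, {}); merge tally; term_dict_false[semester] = count_course
    let count_course := tally.foldl (fun cc p => cc.insert p.1 (cc.getD p.1 0 + p.2)) (d.getD semester PySem.Dict.empty)
    pvOutTD (d.insert semester count_course)

-- ===== PRECONDITION & SPEC =====
def Spec_calculate_term_dict_false (term_dict_false : List (Int × List (Int × Int))) (semester : Int) (t_basket : List Int) (pred_basket : List Int) (reversed_item_dict : List (Int × Int)) (out : List (Int × List (Int × Int))) : Prop := out = calculate_term_dict_false_alt term_dict_false semester t_basket pred_basket reversed_item_dict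
instance (term_dict_false : List (Int × List (Int × Int))) (semester : Int) (t_basket : List Int) (pred_basket : List Int) (reversed_item_dict : List (Int × Int)) (out : List (Int × List (Int × Int))) : Decidable (Spec_calculate_term_dict_false term_dict_false semester t_basket pred_basket reversed_item_dict out) := by unfold Spec_calculate_term_dict_false; infer_instance

-- ===== CLAIM (what is proved, stated in full; the proofs are below) =====
def Claim_equal_calculate_term_dict_false : Prop := ∀ (term_dict_false : List (Int × List (Int × Int))) (semester : Int) (t_basket : List Int) (pred_basket : List Int) (reversed_item_dict : List (Int × Int)), Dom_calculate_term_dict_false term_dict_false semester t_basket pred_basket reversed_item_dict → Spec_calculate_term_dict_false term_dict_false semester t_basket pred_basket reversed_item_dict (calculate_term_dict_false term_dict_false semester t_basket pred_basket reversed_item_dict)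

-- ===== LEMMAS AND PROOFS =====

-- the increment step A performs per absent item, and the aggregated step B performs per distinct item
def pvBump (cc : PySem.Dict Int Int) (x : Int) : PySem.Dict Int Int :=
  cc.insert x (cc.getD x 0 + 1)
def pvAgg (c : Int → Int) (cc : PySem.Dict Int Int) (k : Int) : PySem.Dict Int Int :=
  cc.insert k (cc.getD k 0 + c k)

theorem pv_roundtrip (td : List (Int × List (Int × Int))) : pvOutTD (pvMkTD td) = td := by
  unfold pvMkTD pvOutTD
  rw [show (PySem.Dict.mk (td.map (fun p => (p.1, PySem.Dict.mk p.2)))).items = td.map (fun p => (p.1, PySem.Dict.mk p.2)) from rfl,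
      List.map_map]
  rw [List.map_congr_left (fun p _ => rfl : ∀ p ∈ td, ((fun p => (p.1, PySem.Dict.items p.2)) ∘ fun p => (p.1, PySem.Dict.mk p.2)) p = id p)]
  exact List.map_id td

theorem pv_filter_foldl {α β : Type} (p : β → Bool) (g : α → β → α) :
    ∀ (l : List β) (d : α),
      l.foldl (fun d x => if p x = false then g d x else d) d = (l.filter (fun x => !p x)).foldl g d := by
  intro l
  induction l with
  | nil => intro d; rfl
  | cons x xs ih =>
    intro d
    cases h : p x <;> simp [h, ih]

theorem pv_contains_if (d : PySem.Dict Int (PySem.Dict Int Int)) (s : Int) :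
    (if (d.contains s) = false then PySem.Dict.empty else d.getD s PySem.Dict.empty) = d.getD s PySem.Dict.empty := by
  by_cases h : d.contains s = false
  · simp [h, PySem.Dict.getD_of_not_contains d _ h]
  · simp [h]

theorem pv_bump_if (cc : PySem.Dict Int Int) (x : Int) :
    (if (cc.contains x) = false then cc.insert x 1 else cc.insert x (cc.getD x 0 + 1)) = pvBump cc x := by
  by_cases h : cc.contains x = false
  · simp [h, pvBump, PySem.Dict.getD_of_not_contains cc _ h]
  · simp [h, pvBump]

theorem pv_hoist (semester : Int) :
    ∀ (xs : List Int) (cc : PySem.Dict Int Int) (d : PySem.Dict Int (PySem.Dict Int Int)),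
      xs.foldl (fun d item => d.insert semester (pvBump (d.getD semester PySem.Dict.empty) item)) (d.insert semester cc)
        = d.insert semester (xs.foldl pvBump cc) := by
  intro xs
  induction xs with
  | nil => intro cc d; rfl
  | cons x xs ih =>
    intro cc d
    have h1 : (d.insert semester cc).getD semester PySem.Dict.empty = cc :=
      PySem.Dict.getD_insert_self d semester cc PySem.Dict.empty
    simp only [List.foldl_cons, h1, PySem.Dict.insert_insert_self]
    exact ih (pvBump cc x) d

theorem pv_insert_comm (e : PySem.Dict Int Int) (x k : Int) (u w : Int)
    (hx : e.contains x = true) (hk : x ≠ k) :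
    (e.insert k u).insert x w = (e.insert x w).insert k u := by
  apply PySem.Dict.ext
  have hxk : (e.insert k u).contains x = true := by
    rw [PySem.Dict.contains_insert]; simp [hx]
  by_cases hck : e.contains k = true
  · have hkx : (e.insert x w).contains k = true := by
      rw [PySem.Dict.contains_insert]; simp [hck]
    rw [PySem.Dict.items_insert_of_contains _ _ hxk, PySem.Dict.items_insert_of_contains _ _ hck,
        PySem.Dict.items_insert_of_contains _ _ hkx, PySem.Dict.items_insert_of_contains _ _ hx,
        List.map_map, List.map_map]
    apply List.map_congr_left
    intro p _
    by_cases h1 : p.1 = k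
    · simp [h1, hk, Ne.symm hk]
    · by_cases h2 : p.1 = x <;> simp [h1, h2, hk, Ne.symm hk]
  · have hck' : e.contains k = false := by simpa using hck
    have hkx : (e.insert x w).contains k = false := by
      rw [PySem.Dict.contains_insert]; simp [hck', Ne.symm hk]
    rw [PySem.Dict.items_insert_of_contains _ _ hxk, PySem.Dict.items_insert_of_not_contains _ _ hck',
        PySem.Dict.items_insert_of_not_contains _ _ hkx, PySem.Dict.items_insert_of_contains _ _ hx,
        List.map_append]
    simp [hk, Ne.symm hk]

theorem pv_getD_foldl_agg (c : Int → Int) (x : Int) :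
    ∀ (ks : List Int), x ∉ ks → ∀ (e : PySem.Dict Int Int),
      (ks.foldl (pvAgg c) e).getD x 0 = e.getD x 0 := by
  intro ks
  induction ks with
  | nil => intro _ e; rfl
  | cons k ks ih =>
    intro hx e
    have hne : x ≠ k := fun h => hx (h ▸ List.mem_cons_self)
    simp only [List.foldl_cons]
    rw [ih (fun h => hx (List.mem_cons_of_mem _ h))]
    exact PySem.Dict.getD_insert_of_ne e _ _ hne

theorem pv_insert_foldl_agg (c : Int → Int) (x : Int) (w : Int) :
    ∀ (ks : List Int), x ∉ ks → ∀ (e : PySem.Dict Int Int), e.contains x = true →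
      (ks.foldl (pvAgg c) e).insert x w = ks.foldl (pvAgg c) (e.insert x w) := by
  intro ks
  induction ks with
  | nil => intro _ e _; rfl
  | cons k ks ih =>
    intro hx e he
    have hne : x ≠ k := fun h => hx (h ▸ List.mem_cons_self)
    have he' : (pvAgg c e k).contains x = true := by
      unfold pvAgg; rw [PySem.Dict.contains_insert]; simp [he]
    simp only [List.foldl_cons]
    rw [ih (fun h => hx (List.mem_cons_of_mem _ h)) _ he']
    congr 1
    unfold pvAgg
    rw [pv_insert_comm e x k _ w he hne, PySem.Dict.getD_insert_of_ne e _ _ (Ne.symm hne)]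

theorem pv_mem_dedup (xs : List Int) (x : Int) : x ∈ PySem.List.dedup xs ↔ x ∈ xs :=
  PySem.Set.mem_ofList xs x

theorem pv_dedup_append (xs : List Int) (x : Int) :
    PySem.List.dedup (xs ++ [x]) = if x ∈ xs then PySem.List.dedup xs else PySem.List.dedup xs ++ [x] := by
  have h1 : PySem.List.dedup (xs ++ [x]) = PySem.Set.add (PySem.List.dedup xs) x := by
    show PySem.Set.ofList (xs ++ [x]) = _
    unfold PySem.Set.ofList
    rw [List.foldl_append]
    rfl
  have hc : PySem.Set.contains (PySem.List.dedup xs) x = decide (x ∈ xs) := by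
    by_cases h : x ∈ xs
    · simp [h, PySem.Set.contains, List.elem_eq_true_of_mem ((pv_mem_dedup xs x).mpr h)]
    · simp only [h, decide_false, PySem.Set.contains]
      simpa using fun hc => h ((pv_mem_dedup xs x).mp hc)
  rw [h1]
  unfold PySem.Set.add
  rw [hc]
  by_cases h : x ∈ xs <;> simp [h]

theorem pv_nodup_dedup (xs : List Int) : (PySem.List.dedup xs).Nodup :=
  PySem.Set.nodup_ofList xs

-- the crux: A's item-by-item increments equal B's aggregated per-distinct-key merge
theorem pv_bump_eq_agg :
    ∀ (xs : List Int) (cc : PySem.Dict Int Int),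
      xs.foldl pvBump cc = (PySem.List.dedup xs).foldl (pvAgg (fun k => (xs.count k : Int))) cc := by
  intro xs
  induction xs using List.reverseRecOn with
  | nil => intro cc; rfl
  | append_singleton xs x ih =>
    intro cc
    rw [List.foldl_append, ih, pv_dedup_append]
    by_cases hx : x ∈ xs
    · -- x already occurred: dedup unchanged, x's count grows by one
      simp only [hx, if_true]
      obtain ⟨p, s, hps⟩ := List.append_of_mem ((pv_mem_dedup xs x).mpr hx)
      have hnd : (PySem.List.dedup xs).Nodup := pv_nodup_dedup xs
      rw [hps] at hnd
      have hxps : ¬ x ∈ p ++ s := by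
        have := List.nodup_middle.mp hnd
        exact (List.nodup_cons.mp this).1
      have hxp : x ∉ p := fun h => hxps (List.mem_append_left _ h)
      have hxs : x ∉ s := fun h => hxps (List.mem_append_right _ h)
      have hcount : ∀ k, k ≠ x → ((xs ++ [x]).count k : Int) = (xs.count k : Int) := by
        intro k hk
        rw [List.count_append]
        simp [List.count_singleton, hk, Ne.symm hk]
      have hcongr : ∀ (l : List Int), x ∉ l → ∀ (e : PySem.Dict Int Int),
          l.foldl (pvAgg (fun k => ((xs ++ [x]).count k : Int))) e
            = l.foldl (pvAgg (fun k => (xs.count k : Int))) e := by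
        intro l hl e
        apply PySem.List.foldl_congr_mem
        intro acc k hkl
        unfold pvAgg
        beta_reduce
        rw [hcount k (fun h => hl (h ▸ hkl))]
      rw [hps]
      rw [List.foldl_append, List.foldl_append]
      simp only [List.foldl_cons]
      rw [hcongr p hxp cc]
      set d1 := p.foldl (pvAgg (fun k => (xs.count k : Int))) cc with hd1
      -- left side: bump after the whole agg-fold over p ++ x :: s
      have hgetD : (s.foldl (pvAgg (fun k => (xs.count k : Int))) (pvAgg (fun k => (xs.count k : Int)) d1 x)).getD x 0
          = d1.getD x 0 + (xs.count x : Int) := by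
        rw [pv_getD_foldl_agg _ x s hxs]
        exact PySem.Dict.getD_insert_self d1 x _ 0
      show pvBump (s.foldl (pvAgg (fun k => (xs.count k : Int))) (pvAgg (fun k => (xs.count k : Int)) d1 x)) x = _
      unfold pvBump
      rw [hgetD]
      have hcont : (pvAgg (fun k => (xs.count k : Int)) d1 x).contains x = true := by
        unfold pvAgg
        exact PySem.Dict.contains_insert_self d1 x _
      rw [pv_insert_foldl_agg _ x _ s hxs _ hcont]
      rw [hcongr s hxs]
      congr 1
      unfold pvAgg
      rw [PySem.Dict.insert_insert_self]
      congr 1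
      beta_reduce
      rw [List.count_append]
      simp [List.count_singleton]
      push_cast
      ring
    · -- x is new: dedup gains x at the end with count 1
      simp only [hx, if_false]
      rw [List.foldl_append]
      have hxd : x ∉ PySem.List.dedup xs := fun h => hx ((pv_mem_dedup xs x).mp h)
      have hcongr : (PySem.List.dedup xs).foldl (pvAgg (fun k => ((xs ++ [x]).count k : Int))) cc
          = (PySem.List.dedup xs).foldl (pvAgg (fun k => (xs.count k : Int))) cc := by
        apply PySem.List.foldl_congr_mem
        intro acc k hkl
        have hk : k ≠ x := fun h => hxd (h ▸ hkl)
        unfold pvAgg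
        beta_reduce
        rw [List.count_append]
        simp [List.count_singleton, hk, Ne.symm hk]
      rw [hcongr]
      simp only [List.foldl_cons, List.foldl_nil]
      unfold pvBump pvAgg
      congr 1
      beta_reduce
      rw [List.count_append]
      have : xs.count x = 0 := List.count_eq_zero.mpr hx
      simp [this, List.count_singleton]

-- ===== VERDICT (by name: the statement is the Claim_ definition above) =====
theorem calculate_term_dict_false_spec : Claim_equal_calculate_term_dict_false := by
  intro td semester t_basket pred_basket rid _
  unfold Spec_calculate_term_dict_false
  unfold calculate_term_dict_false calculate_term_dict_false_alt
  have hstep : (fun (d : PySem.Dict Int (PySem.Dict Int Int)) (item : Int) =>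
      if (t_basket.contains item) = false then
        let count_course := if (d.contains semester) = false then PySem.Dict.empty else d.getD semester PySem.Dict.empty
        let count_course := if (count_course.contains item) = false then count_course.insert item 1 else count_course.insert item (count_course.getD item 0 + 1)
        d.insert semester count_course
      else d)
      = (fun d item =>
        if (t_basket.contains item) = false then
          d.insert semester (pvBump (d.getD semester PySem.Dict.empty) item)
        else d) := by
    funext d item
    simp only [pv_contains_if, pv_bump_if]
  rw [hstep]
  rw [pv_filter_foldl (fun item => t_basket.contains item)
      (fun d item => d.insert semester (pvBump (d.getD semester PySem.Dict.empty) item)) pred_basket (pvMkTD td)]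
  cases habs : pred_basket.filter (fun item => !(t_basket.contains item)) with
  | nil =>
    simp only [habs, List.foldl_nil, List.isEmpty_nil, if_true]
    exact pv_roundtrip td
  | cons a as =>
    simp only [habs, List.isEmpty_cons, if_false]
    simp only [List.foldl_cons]
    rw [pv_hoist semester as (pvBump ((pvMkTD td).getD semester PySem.Dict.empty) a) (pvMkTD td)]
    have : as.foldl pvBump (pvBump ((pvMkTD td).getD semester PySem.Dict.empty) a)
        = (a :: as).foldl pvBump ((pvMkTD td).getD semester PySem.Dict.empty) := rfl
    rw [this, pv_bump_eq_agg]
    rw [List.foldl_map]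
    rfl
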